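-- pv_equiv track=rewrite | github.com/VelichkinPetr/Algorithms | DZ_1/task_2.py | get_min_common_elem
-- ===== SOURCE A (Python) =====
-- def get_min_common_elem(numbers):
--     min_elem = 0
--     count_elem = 0
--     for number in numbers:
--         if numbers.count(number) > count_elem:
--             min_elem = number
--             count_elem = numbers.count(number)
--         elif numbers.count(number) == count_elem and number < min_elem:
--             min_elem = number
--     return min_elem
-- ===== SOURCE B (Python) =====
-- def get_min_common_elem(numbers):
--     if not numbers:
--         return 0
--     s = sorted(numbers)
--     run_val = s[0]
--     run_len = 0
--     best_val = s[0]
--     best_len = 0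
--     for x in s:
--         if x == run_val:
--             run_len += 1
--         else:
--             run_val = x
--             run_len = 1
--         if run_len > best_len:
--             best_val = run_val
--             best_len = run_len
--     return best_val
-- ===== Notes on version B (the rewrite author's own statement) =====
-- stated objective: faster
-- what changed: Replaced the quadratic scan that recomputes numbers.count(x) for every element with a sort followed by a single run-length scan of the sorted copy; ascending order plus strict best-length updates reproduce the smallest-on-tie rule.
import Mathlib
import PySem

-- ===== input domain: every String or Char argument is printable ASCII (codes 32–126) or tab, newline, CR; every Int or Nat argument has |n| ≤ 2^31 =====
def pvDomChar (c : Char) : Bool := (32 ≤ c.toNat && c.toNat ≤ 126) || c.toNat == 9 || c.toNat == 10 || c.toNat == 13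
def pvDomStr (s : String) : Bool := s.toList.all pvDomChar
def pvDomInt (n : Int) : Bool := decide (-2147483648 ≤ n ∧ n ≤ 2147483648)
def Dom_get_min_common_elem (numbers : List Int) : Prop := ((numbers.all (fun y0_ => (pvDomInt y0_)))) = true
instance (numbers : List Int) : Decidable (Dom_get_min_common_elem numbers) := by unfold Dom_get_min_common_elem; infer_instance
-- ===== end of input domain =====

-- B replaces A's quadratic repeated .count() scan by sort + one run-length scan (measurably faster).

-- ===== PORT A =====
-- the loop body of A: recompute numbers.count(number) and update (min_elem, count_elem)
def pvStepA (numbers : List Int) (st : Int × Int) (number : Int) : Int × Int :=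
  if ((PySem.List.count numbers number : Int)) > st.2 then
    (number, (PySem.List.count numbers number : Int))
  else if (PySem.List.count numbers number : Int) = st.2 ∧ number < st.1 then
    (number, st.2)
  else st

def get_min_common_elem (numbers : List Int) : Int :=
  (numbers.foldl (pvStepA numbers) ((0 : Int), (0 : Int))).1

-- ===== PORT B =====
-- the loop body of B: state (run_val, run_len, best_val, best_len)
def pvStepB (st : Int × Int × Int × Int) (x : Int) : Int × Int × Int × Int :=
  let rv := if x = st.1 then st.1 else x
  let rl := if x = st.1 then st.2.1 + 1 else 1
  if rl > st.2.2.2 then (rv, rl, rv, rl) else (rv, rl, st.2.2.1, st.2.2.2)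

def get_min_common_elem_alt (numbers : List Int) : Int :=
  -- "if not numbers: return 0"; then s = sorted(numbers), s[0] is its head
  match PySem.List.sorted numbers (fun x => x) false with
  | [] => 0
  | h :: t => (((h :: t).foldl pvStepB (h, 0, h, 0)).2.2.1)

-- ===== PRECONDITION & SPEC =====
def Spec_get_min_common_elem (numbers : List Int) (out : Int) : Prop := out = get_min_common_elem_alt numbers
instance (numbers : List Int) (out : Int) : Decidable (Spec_get_min_common_elem numbers out) := by unfold Spec_get_min_common_elem; infer_instance

-- ===== CLAIM (what is proved, stated in full; the proofs are below) =====
def Claim_equal_get_min_common_elem : Prop := ∀ (numbers : List Int), Dom_get_min_common_elem numbers → Spec_get_min_common_elem numbers (get_min_common_elem numbers)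

-- ===== LEMMAS AND PROOFS =====

-- count of x, as Python's int
def pvCnt (l : List Int) (x : Int) : Int := (PySem.List.count l x : Int)

-- "m is the smallest element of p whose c-count is the maximal count k"
def pvBest (c : Int → Int) (p : List Int) (m k : Int) : Prop :=
  m ∈ p ∧ c m = k ∧ ∀ x ∈ p, c x ≤ k ∧ (c x = k → m ≤ x)

lemma pvCnt_append (p : List Int) (x y : Int) :
    pvCnt (p ++ [x]) y = pvCnt p y + (if y = x then 1 else 0) := by
  simp [pvCnt, PySem.List.count_eq, List.count_append, List.count_singleton, beq_iff_eq]
  split_ifs <;> simp_all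

lemma pvCnt_pos {p : List Int} {y : Int} (h : y ∈ p) : 1 ≤ pvCnt p y := by
  simp [pvCnt, PySem.List.count_eq]
  exact h

lemma pvBest_unique {c : Int → Int} {p : List Int} {m1 k1 m2 k2 : Int}
    (h1 : pvBest c p m1 k1) (h2 : pvBest c p m2 k2) : m1 = m2 := by
  obtain ⟨hm1, hc1, h1'⟩ := h1
  obtain ⟨hm2, hc2, h2'⟩ := h2
  have hk : k1 = k2 := le_antisymm (hc1 ▸ (h2' m1 hm1).1) (hc2 ▸ (h1' m2 hm2).1)
  exact le_antisymm ((h1' m2 hm2).2 (by omega)) ((h2' m1 hm1).2 (by omega))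

lemma stepA_eq_gt (numbers : List Int) (m k x : Int) (h : pvCnt numbers x > k) :
    pvStepA numbers (m, k) x = (x, pvCnt numbers x) := by
  simp only [pvStepA, pvCnt] at h ⊢
  rw [if_pos h]

lemma stepA_eq_eq (numbers : List Int) (m k x : Int) (h1 : ¬ pvCnt numbers x > k)
    (h2 : pvCnt numbers x = k ∧ x < m) : pvStepA numbers (m, k) x = (x, k) := by
  simp only [pvStepA, pvCnt] at h1 h2 ⊢
  rw [if_neg h1, if_pos h2]

lemma stepA_eq_keep (numbers : List Int) (m k x : Int) (h1 : ¬ pvCnt numbers x > k)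
    (h2 : ¬ (pvCnt numbers x = k ∧ x < m)) : pvStepA numbers (m, k) x = (m, k) := by
  simp only [pvStepA, pvCnt] at h1 h2 ⊢
  rw [if_neg h1, if_neg h2]

lemma stepA_inv (numbers : List Int) (p : List Int) (m k x : Int)
    (hx : 1 ≤ pvCnt numbers x)
    (h : (p = [] ∧ m = 0 ∧ k = 0) ∨ pvBest (pvCnt numbers) p m k) :
    pvBest (pvCnt numbers) (p ++ [x])
      (pvStepA numbers (m, k) x).1 (pvStepA numbers (m, k) x).2 := by
  rcases h with ⟨hp, hm, hk⟩ | ⟨hm, hc, hall⟩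
  · subst hp; subst hm; subst hk
    rw [stepA_eq_gt numbers 0 0 x (by omega)]
    refine ⟨by simp, rfl, ?_⟩
    intro z hz
    simp only [List.nil_append, List.mem_singleton] at hz
    subst hz
    exact ⟨le_refl _, fun _ => le_refl _⟩
  · by_cases h1 : pvCnt numbers x > k
    · rw [stepA_eq_gt numbers m k x h1]
      refine ⟨by simp, rfl, ?_⟩
      intro z hz
      rcases List.mem_append.mp hz with hz | hz
      · have := (hall z hz).1
        exact ⟨by omega, fun hh => absurd hh (by omega)⟩
      · simp only [List.mem_singleton] at hz
        subst hz
        exact ⟨le_refl _, fun _ => le_refl _⟩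
    · by_cases h2 : pvCnt numbers x = k ∧ x < m
      · rw [stepA_eq_eq numbers m k x h1 h2]
        refine ⟨by simp, h2.1, ?_⟩
        intro z hz
        rcases List.mem_append.mp hz with hz | hz
        · exact ⟨(hall z hz).1,
            fun hck => le_of_lt (lt_of_lt_of_le h2.2 ((hall z hz).2 hck))⟩
        · simp only [List.mem_singleton] at hz
          subst hz
          exact ⟨le_of_eq h2.1, fun _ => le_refl _⟩
      · rw [stepA_eq_keep numbers m k x h1 h2]
        simp only [not_and, not_lt] at h2
        refine ⟨List.mem_append_left _ hm, hc, ?_⟩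
        intro z hz
        rcases List.mem_append.mp hz with hz | hz
        · exact hall z hz
        · simp only [List.mem_singleton] at hz
          subst hz
          exact ⟨by omega, fun hck => h2 hck⟩

lemma foldA_inv (numbers : List Int) :
    ∀ (l p : List Int) (m k : Int),
      (∀ x ∈ l, 1 ≤ pvCnt numbers x) →
      ((p = [] ∧ m = 0 ∧ k = 0) ∨ pvBest (pvCnt numbers) p m k) →
      ((p ++ l = [] ∧ l.foldl (pvStepA numbers) (m, k) = (0, 0)) ∨
        pvBest (pvCnt numbers) (p ++ l)
          (l.foldl (pvStepA numbers) (m, k)).1 (l.foldl (pvStepA numbers) (m, k)).2) := by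
  intro l
  induction l with
  | nil =>
    intro p m k _ h
    rcases h with ⟨hp, hm, hk⟩ | hb
    · subst hp; subst hm; subst hk
      exact Or.inl ⟨rfl, rfl⟩
    · exact Or.inr (by simpa using hb)
  | cons x l ih =>
    intro p m k hx h
    have hstep := stepA_inv numbers p m k x (hx x (by simp)) h
    have hrec := ih (p ++ [x]) (pvStepA numbers (m, k) x).1 (pvStepA numbers (m, k) x).2
      (fun z hz => hx z (by simp [hz])) (Or.inr hstep)
    simpa [List.append_assoc] using hrec

lemma A_best (numbers : List Int) (hne : numbers ≠ []) :
    ∃ k, pvBest (pvCnt numbers) numbers (get_min_common_elem numbers) k := by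
  have h := foldA_inv numbers numbers [] 0 0 (fun x hx => pvCnt_pos hx)
    (Or.inl ⟨rfl, rfl, rfl⟩)
  simp only [List.nil_append] at h
  rcases h with ⟨h1, _⟩ | hb
  · exact absurd h1 hne
  · exact ⟨_, hb⟩

-- invariant of B's scan over a processed nonempty sorted prefix p:
-- run_val is the (maximal) last value, run_len its count in p, (best_val, best_len) is pvBest of p
def pvInvB (p : List Int) (st : Int × Int × Int × Int) : Prop :=
  st.1 ∈ p ∧ (∀ y ∈ p, y ≤ st.1) ∧ st.2.1 = pvCnt p st.1 ∧
    pvBest (pvCnt p) p st.2.2.1 st.2.2.2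

lemma stepB_eq_same (rv rl bv bl x : Int) (h : x = rv) :
    pvStepB (rv, rl, bv, bl) x =
      if rl + 1 > bl then (rv, rl + 1, rv, rl + 1) else (rv, rl + 1, bv, bl) := by
  simp [pvStepB, h]

lemma stepB_eq_new (rv rl bv bl x : Int) (h : x ≠ rv) :
    pvStepB (rv, rl, bv, bl) x =
      if 1 > bl then (x, 1, x, 1) else (x, 1, bv, bl) := by
  simp [pvStepB, h]

lemma stepB_inv (p : List Int) (st : Int × Int × Int × Int) (x : Int)
    (hle : ∀ y ∈ p, y ≤ x) (h : pvInvB p st) :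
    pvInvB (p ++ [x]) (pvStepB st x) := by
  obtain ⟨rv, rl, bv, bl⟩ := st
  obtain ⟨hrv, hmax, hrl, hbv, hbc, hball⟩ := h
  dsimp only at hrv hmax hrl hbv hbc hball
  have hblpos : 1 ≤ bl := hbc ▸ pvCnt_pos hbv
  by_cases hx : x = rv
  · subst hx
    have hcx' : pvCnt (p ++ [x]) x = rl + 1 := by rw [pvCnt_append, if_pos rfl, hrl]
    have hother : ∀ y, y ≠ x → pvCnt (p ++ [x]) y = pvCnt p y := by
      intro y hy; rw [pvCnt_append, if_neg hy]; omega
    rw [stepB_eq_same _ _ _ _ _ rfl]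
    by_cases hgt : rl + 1 > bl
    · rw [if_pos hgt]
      unfold pvInvB pvBest
      dsimp only
      refine ⟨List.mem_append_left _ hrv, ?_, hcx'.symm,
        List.mem_append_left _ hrv, hcx', ?_⟩
      · intro y hy
        rcases List.mem_append.mp hy with hy | hy
        · exact hmax y hy
        · simp only [List.mem_singleton] at hy; omega
      · intro y hy
        by_cases hyx : y = x
        · subst hyx; rw [hcx']; exact ⟨le_refl _, fun _ => le_refl _⟩
        · rw [hother y hyx]
          rcases List.mem_append.mp hy with hy | hy
          · have := (hball y hy).1
            exact ⟨by omega, fun hh => absurd hh (by omega)⟩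
          · simp only [List.mem_singleton] at hy; exact absurd hy hyx
    · rw [if_neg hgt]
      unfold pvInvB pvBest
      dsimp only
      have hbvx : bv ≠ x := by
        intro hh
        rw [hh] at hbc
        rw [← hrl] at hbc
        omega
      refine ⟨List.mem_append_left _ hrv, ?_, hcx'.symm,
        List.mem_append_left _ hbv, by rw [hother bv hbvx]; exact hbc, ?_⟩
      · intro y hy
        rcases List.mem_append.mp hy with hy | hy
        · exact hmax y hy
        · simp only [List.mem_singleton] at hy; omega
      · intro y hy
        by_cases hyx : y = x
        · subst hyx
          rw [hcx']
          exact ⟨by omega, fun _ => hmax bv hbv⟩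
        · rw [hother y hyx]
          rcases List.mem_append.mp hy with hy | hy
          · exact hball y hy
          · simp only [List.mem_singleton] at hy; exact absurd hy hyx
  · -- new run: x ∉ p
    have hxp : x ∉ p := by
      intro hh
      exact hx (le_antisymm (hmax x hh) (hle rv hrv))
    have hcx' : pvCnt (p ++ [x]) x = 1 := by
      rw [pvCnt_append, if_pos rfl]
      have : pvCnt p x = 0 := by
        simp only [pvCnt, PySem.List.count_eq]
        exact_mod_cast congrArg Nat.cast (List.count_eq_zero.mpr hxp)
      omega
    have hother : ∀ y, y ≠ x → pvCnt (p ++ [x]) y = pvCnt p y := by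
      intro y hy; rw [pvCnt_append, if_neg hy]; omega
    rw [stepB_eq_new _ _ _ _ _ hx, if_neg (by omega : ¬ ((1:Int) > bl))]
    unfold pvInvB pvBest
    dsimp only
    have hbvx : bv ≠ x := fun hh => hxp (hh ▸ hbv)
    refine ⟨List.mem_append_right _ (by simp), ?_, hcx'.symm,
      List.mem_append_left _ hbv, by rw [hother bv hbvx]; exact hbc, ?_⟩
    · intro y hy
      rcases List.mem_append.mp hy with hy | hy
      · exact hle y hy
      · simp only [List.mem_singleton] at hy; omega
    · intro y hy
      by_cases hyx : y = x
      · subst hyx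
        rw [hcx']
        exact ⟨hblpos, fun _ => hle bv hbv⟩
      · rw [hother y hyx]
        rcases List.mem_append.mp hy with hy | hy
        · exact hball y hy
        · simp only [List.mem_singleton] at hy; exact absurd hy hyx

lemma foldB_inv :
    ∀ (l p : List Int) (st : Int × Int × Int × Int),
      (∀ y ∈ p, ∀ x ∈ l, y ≤ x) → l.Pairwise (· ≤ ·) → pvInvB p st →
      pvInvB (p ++ l) (l.foldl pvStepB st) := by
  intro l
  induction l with
  | nil => intro p st _ _ h; simpa using h
  | cons x l ih =>
    intro p st hle hpw h
    have hstep := stepB_inv p st x (fun y hy => hle y hy x (by simp)) h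
    have hrec := ih (p ++ [x]) (pvStepB st x)
      (fun y hy z hz => by
        rcases List.mem_append.mp hy with hy | hy
        · exact hle y hy z (by simp [hz])
        · simp only [List.mem_singleton] at hy
          subst hy
          exact (List.pairwise_cons.mp hpw).1 z hz)
      (List.pairwise_cons.mp hpw).2 hstep
    simpa [List.append_assoc] using hrec

lemma best_perm {s t : List Int} (hp : s.Perm t) {m k : Int}
    (h : pvBest (pvCnt s) s m k) : pvBest (pvCnt t) t m k := by
  have hc : ∀ y, pvCnt s y = pvCnt t y := by
    intro y
    simp [pvCnt, PySem.List.count_eq, hp.count_eq]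
  obtain ⟨hm, hcm, hall⟩ := h
  exact ⟨hp.mem_iff.mp hm, hc m ▸ hcm,
    fun y hy => by rw [← hc y]; exact hall y (hp.mem_iff.mpr hy)⟩

lemma B_best (numbers : List Int) (hne : numbers ≠ []) :
    ∃ k, pvBest (pvCnt numbers) numbers (get_min_common_elem_alt numbers) k := by
  have hperm : (PySem.List.sorted numbers (fun x => x) false).Perm numbers :=
    PySem.List.sorted_perm numbers (fun x => x) false
  have hpw : (PySem.List.sorted numbers (fun x => x) false).Pairwise (fun a b => a ≤ b) :=
    PySem.List.sorted_pairwise numbers (fun x => x)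
  unfold get_min_common_elem_alt
  rcases hs : PySem.List.sorted numbers (fun x => x) false with _ | ⟨h, t⟩
  · rw [hs] at hperm
    exact absurd hperm.symm.eq_nil hne
  · rw [hs] at hperm hpw
    have hinit : pvInvB [h] (pvStepB (h, 0, h, 0) h) := by
      rw [stepB_eq_same _ _ _ _ _ rfl, if_pos (by omega : (0:Int) + 1 > 0)]
      unfold pvInvB pvBest
      dsimp only
      have hc1 : pvCnt [h] h = 1 := by simp [pvCnt, PySem.List.count_eq]
      refine ⟨by simp, ?_, by omega, by simp, by omega, ?_⟩
      · intro y hy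
        simp only [List.mem_singleton] at hy
        omega
      · intro y hy
        simp only [List.mem_singleton] at hy
        subst hy
        exact ⟨by omega, fun _ => le_refl _⟩
    have hpwc := List.pairwise_cons.mp hpw
    have hinv := foldB_inv t [h] (pvStepB (h, 0, h, 0) h)
      (fun y hy z hz => by
        simp only [List.mem_singleton] at hy
        subst hy
        exact hpwc.1 z hz)
      hpwc.2 hinit
    simp only [List.singleton_append] at hinv
    have hb := hinv.2.2.2
    have hb' := best_perm hperm hb
    exact ⟨_, by simpa using hb'⟩

-- ===== VERDICT (by name: the statement is the Claim_ definition above) =====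
theorem get_min_common_elem_spec : Claim_equal_get_min_common_elem := by
  intro numbers _
  unfold Spec_get_min_common_elem
  by_cases hne : numbers = []
  · subst hne; rfl
  · obtain ⟨k1, h1⟩ := A_best numbers hne
    obtain ⟨k2, h2⟩ := B_best numbers hne
    exact pvBest_unique h1 h2
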